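-- pv_equiv track=rewrite | github.com/mosdef-hub/Grouper | Grouper/fragmentation.py | _get_first_compatible_tuples
-- ===== SOURCE A (Python) =====
-- def _get_first_compatible_tuples(tupleofGroups):
--     """
--     Only return first matched structures. Return [] if no compatible Groups
--     """
--     if not tupleofGroups:
--         return []
--     # compatibleGroupsList = [(tupleofGroups[0],)]
--     compatibleGroupsList = [tupleofGroups[0]]
--     for group in tupleofGroups[1:]:  # iter over remaining groups
--         # check compatibility function
--         clashes = _mask_number_clashes(
--             compatibleGroupsList, group
--         )  # indexList that corresponds to clashes
--         n_clashes = sum(clashes)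
--         if not n_clashes:
--             compatibleGroupsList.append(group)
--
--     return [tuple(compatibleGroupsList)]  # keep in general format
--
-- def _mask_number_clashes(groupList, group):
--     """Return a mask of 0's and 1's if there are clashes with group."""
--     groupSet = set(group)
--     maskList = []
--     for compGroup in groupList:
--         compSet = set(compGroup)
--         maskList.append(not compSet.isdisjoint(groupSet))
--     return maskList
-- ===== SOURCE B (Python) =====
-- def _get_first_compatible_tuples(tupleofGroups):
--     """
--     Only return first matched structures. Return [] if no compatible Groups
--     """
--     if not tupleofGroups:
--         return []
--     selected = [tupleofGroups[0]]
--     used = set(tupleofGroups[0])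
--     for group in tupleofGroups[1:]:
--         if used.isdisjoint(group):
--             selected.append(group)
--             used.update(group)
--     return [tuple(selected)]
-- ===== Notes on version B (the rewrite author's own statement) =====
-- stated objective: faster
-- what changed: Instead of rebuilding a set per selected group and scanning the whole selection for each candidate, B keeps one running set of used elements and does a single incremental disjointness test and update per group.
import Mathlib
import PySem

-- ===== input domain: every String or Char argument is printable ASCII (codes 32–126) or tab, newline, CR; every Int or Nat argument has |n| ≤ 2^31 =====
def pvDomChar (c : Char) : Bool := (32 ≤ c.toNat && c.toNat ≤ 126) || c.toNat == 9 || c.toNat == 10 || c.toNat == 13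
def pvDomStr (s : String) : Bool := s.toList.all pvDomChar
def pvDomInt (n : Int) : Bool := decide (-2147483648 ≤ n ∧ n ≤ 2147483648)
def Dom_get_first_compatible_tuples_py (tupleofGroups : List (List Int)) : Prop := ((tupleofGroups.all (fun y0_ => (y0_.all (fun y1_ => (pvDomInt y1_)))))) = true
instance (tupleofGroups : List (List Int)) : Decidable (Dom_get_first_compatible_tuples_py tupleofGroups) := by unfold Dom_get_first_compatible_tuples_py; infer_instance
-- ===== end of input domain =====

-- B replaces A's per-candidate scan of all selected groups (a fresh set per group)
-- by one running set of used elements with an incremental disjointness test; faster.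

-- ===== PORT A =====
-- _mask_number_clashes: a fresh set per selected group, mask of clashes
def mask_number_clashes_py (groupList : List (List Int)) (group : List Int) : List Bool :=
  let groupSet := PySem.Set.ofList group
  groupList.foldl
    (fun maskList compGroup =>
      maskList ++ [!(PySem.Set.isdisjoint (PySem.Set.ofList compGroup) groupSet)]) []

def get_first_compatible_tuples_py (tupleofGroups : List (List Int)) : List (List (List Int)) :=
  match tupleofGroups with
  | [] => []
  | g0 :: rest =>
    let compatibleGroupsList := rest.foldl
      (fun compatibleGroupsList group =>
        let clashes := mask_number_clashes_py compatibleGroupsList group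
        let n_clashes := (clashes.map (fun b => if b then (1 : Int) else 0)).sum
        if n_clashes = 0 then compatibleGroupsList ++ [group] else compatibleGroupsList)
      [g0]
    [compatibleGroupsList]

-- ===== PORT B =====
def get_first_compatible_tuples_py_alt (tupleofGroups : List (List Int)) : List (List (List Int)) :=
  match tupleofGroups with
  | [] => []
  | g0 :: rest =>
    let st := rest.foldl
      (fun (st : List (List Int) × PySem.Set Int) group =>
        if PySem.Set.isdisjoint st.2 group then
          (st.1 ++ [group], PySem.Set.update st.2 group)
        else st)
      ([g0], PySem.Set.ofList g0)
    [st.1]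

-- ===== PRECONDITION & SPEC =====
def Spec_get_first_compatible_tuples_py (tupleofGroups : List (List Int)) (out : List (List (List Int))) : Prop := out = get_first_compatible_tuples_py_alt tupleofGroups
instance (tupleofGroups : List (List Int)) (out : List (List (List Int))) : Decidable (Spec_get_first_compatible_tuples_py tupleofGroups out) := by unfold Spec_get_first_compatible_tuples_py; infer_instance

-- ===== CLAIM (what is proved, stated in full; the proofs are below) =====
def Claim_equal_get_first_compatible_tuples_py : Prop := ∀ (tupleofGroups : List (List Int)), Dom_get_first_compatible_tuples_py tupleofGroups → Spec_get_first_compatible_tuples_py tupleofGroups (get_first_compatible_tuples_py tupleofGroups)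

-- ===== LEMMAS AND PROOFS =====

-- the mask is a map over the selected groups
theorem mask_eq_map (groupList : List (List Int)) (group : List Int) :
    mask_number_clashes_py groupList group =
      groupList.map (fun c => !(PySem.Set.isdisjoint (PySem.Set.ofList c) (PySem.Set.ofList group))) := by
  unfold mask_number_clashes_py
  simpa using PySem.List.foldl_append_singleton_eq_map
    (fun c => !(PySem.Set.isdisjoint (PySem.Set.ofList c) (PySem.Set.ofList group))) groupList []

-- a 0/1-sum is zero iff every entry is false
theorem sum_ite_zero_iff (l : List Bool) :
    ((l.map (fun b => if b then (1 : Int) else 0)).sum = 0) ↔ ∀ b ∈ l, b = false := by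
  induction l with
  | nil => simp
  | cons b t ih =>
    have ht : 0 ≤ ((t.map (fun b => if b then (1 : Int) else 0)).sum) := by
      apply List.sum_nonneg
      intro x hx
      simp only [List.mem_map] at hx
      obtain ⟨c, _, rfl⟩ := hx
      split <;> omega
    cases b
    · simp [ih]
    · simp only [List.map_cons, List.sum_cons, if_true]
      constructor
      · intro h; exact absurd h (by omega)
      · intro h; exact absurd (h true (by simp)) (by simp)

-- A's "no clashes" condition equals "disjoint from every selected group"
theorem clashes_zero_iff (comp : List (List Int)) (group : List Int) :
    (((mask_number_clashes_py comp group).map (fun b => if b then (1 : Int) else 0)).sum = 0) ↔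
      ∀ c ∈ comp, ∀ x ∈ c, x ∉ group := by
  rw [mask_eq_map, sum_ite_zero_iff]
  constructor
  · intro h c hc x hx hxg
    have := h _ (List.mem_map_of_mem hc)
    simp only [Bool.not_eq_false'] at this
    exact (PySem.Set.isdisjoint_iff _ _).mp this x ((PySem.Set.mem_ofList _ _).mpr hx)
      ((PySem.Set.mem_ofList _ _).mpr hxg)
  · intro h b hb
    simp only [List.mem_map] at hb
    obtain ⟨c, hc, rfl⟩ := hb
    simp only [Bool.not_eq_false']
    rw [PySem.Set.isdisjoint_iff]
    intro x hx hxg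
    exact h c hc x ((PySem.Set.mem_ofList _ _).mp hx) ((PySem.Set.mem_ofList _ _).mp hxg)

-- main loop invariant: B's running set holds exactly the elements of A's selection
theorem loop_agree (rest : List (List Int)) :
    ∀ (comp : List (List Int)) (used : PySem.Set Int),
      (∀ x, x ∈ used ↔ ∃ c ∈ comp, x ∈ c) →
      rest.foldl
        (fun compatibleGroupsList group =>
          let clashes := mask_number_clashes_py compatibleGroupsList group
          let n_clashes := (clashes.map (fun b => if b then (1 : Int) else 0)).sum
          if n_clashes = 0 then compatibleGroupsList ++ [group] else compatibleGroupsList)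
        comp
      =
      (rest.foldl
        (fun (st : List (List Int) × PySem.Set Int) group =>
          if PySem.Set.isdisjoint st.2 group then
            (st.1 ++ [group], PySem.Set.update st.2 group)
          else st)
        (comp, used)).1 := by
  induction rest with
  | nil => intro comp used _; rfl
  | cons g t ih =>
    intro comp used hinv
    simp only [List.foldl_cons]
    have hcond : (((mask_number_clashes_py comp g).map (fun b => if b then (1 : Int) else 0)).sum = 0)
        ↔ PySem.Set.isdisjoint used g = true := by
      rw [clashes_zero_iff, PySem.Set.isdisjoint_iff]
      constructor
      · intro h x hx
        obtain ⟨c, hc, hxc⟩ := (hinv x).mp hx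
        exact h c hc x hxc
      · intro h c hc x hx
        exact h x ((hinv x).mpr ⟨c, hc, hx⟩)
    by_cases hd : PySem.Set.isdisjoint used g = true
    · rw [if_pos (hcond.mpr hd), if_pos hd]
      apply ih
      intro x
      rw [PySem.Set.mem_update]
      constructor
      · rintro (hx | hx)
        · obtain ⟨c, hc, hxc⟩ := (hinv x).mp hx
          exact ⟨c, List.mem_append_left _ hc, hxc⟩
        · exact ⟨g, List.mem_append_right _ (List.mem_singleton.mpr rfl), hx⟩
      · rintro ⟨c, hc, hxc⟩
        rcases List.mem_append.mp hc with hc | hc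
        · exact Or.inl ((hinv x).mpr ⟨c, hc, hxc⟩)
        · rw [List.mem_singleton] at hc; subst hc; exact Or.inr hxc
    · rw [if_neg (fun h => hd (hcond.mp h)), if_neg hd]
      exact ih comp used hinv

-- ===== VERDICT (by name: the statement is the Claim_ definition above) =====
theorem get_first_compatible_tuples_py_spec : Claim_equal_get_first_compatible_tuples_py := by
  intro tupleofGroups _
  unfold Spec_get_first_compatible_tuples_py get_first_compatible_tuples_py get_first_compatible_tuples_py_alt
  match tupleofGroups with
  | [] => rfl
  | g0 :: rest =>
    simp only
    congr 1
    apply loop_agree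
    intro x
    simp [PySem.Set.mem_ofList]
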